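-- pv_equiv track=rewrite | github.com/zhing2006/hermes-agent | tests/tools/test_dockerfile_pid1_reaping.py | _dockerfile_instructions
-- ===== SOURCE A (Python) =====
-- def _dockerfile_instructions(dockerfile_text: str) -> list[str]:
--     instructions: list[str] = []
--     current = ""
--
--     for raw_line in dockerfile_text.splitlines():
--         line = raw_line.strip()
--         if not line or line.startswith("#"):
--             continue
--
--         continued = line.removesuffix("\\").strip()
--         current = f"{current} {continued}".strip()
--         if not line.endswith("\\"):
--             instructions.append(current)
--             current = ""
--
--     return instructions
-- ===== SOURCE B (Python) =====
-- def _dockerfile_instructions(dockerfile_text: str) -> list[str]: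
--     # Stage 1: keep only non-empty, non-comment stripped lines.
--     lines = [ln for ln in (raw.strip() for raw in dockerfile_text.splitlines())
--              if ln and not ln.startswith("#")]
--
--     # Stage 2: recursively split the list at the first non-continued line and
--     # join each slice into one instruction (empty segments dropped so spacing
--     # collapses); a trailing group that never terminates yields nothing.
--     def emit(ls):
--         for i, l in enumerate(ls):
--             if not l.endswith("\\"):
--                 head, rest = ls[:i + 1], ls[i + 1:]
--                 parts = [p for p in (x.removesuffix("\\").strip() for x in head) if p]
--                 return [" ".join(parts)] + emit(rest)
--         return []
--
--     return emit(lines)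
-- ===== Notes on version B (the rewrite author's own statement) =====
-- stated objective: alternative
-- what changed: Replaces A's single loop with a per-line re-stripped string accumulator by two stages: a filtering comprehension over splitlines, then a recursive splitter that scans for the first non-continued line, slices that group off and joins its nonempty segments with single spaces.
import Mathlib
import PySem

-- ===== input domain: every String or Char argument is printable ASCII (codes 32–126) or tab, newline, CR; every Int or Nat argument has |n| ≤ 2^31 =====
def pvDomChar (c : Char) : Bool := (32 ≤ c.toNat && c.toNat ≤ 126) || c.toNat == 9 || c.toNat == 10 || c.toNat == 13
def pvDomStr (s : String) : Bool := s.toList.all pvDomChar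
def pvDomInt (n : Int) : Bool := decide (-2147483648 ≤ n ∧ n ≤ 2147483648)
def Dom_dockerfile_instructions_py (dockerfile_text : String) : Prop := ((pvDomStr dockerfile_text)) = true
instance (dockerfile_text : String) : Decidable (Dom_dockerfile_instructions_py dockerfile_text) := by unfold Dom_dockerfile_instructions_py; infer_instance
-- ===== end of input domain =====

-- B replaces A's single loop with a re-stripped string accumulator by a filtering pass followed by
-- a recursive splitter that slices off each instruction's group of lines (objective: alternative).

-- ===== PORT A =====
-- exact port of str.removesuffix("\\"): drop the one-char suffix iff present
def pvRemBS (line : List Char) : List Char :=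
  if PySem.Chars.endswith line ['\\'] then line.dropLast else line

def pvStepA (st : List String × List Char) (rawLine : List Char) : List String × List Char :=
  let line := PySem.Chars.strip rawLine
  if line.isEmpty || PySem.Chars.startswith line ['#'] then st
  else
    let continued := PySem.Chars.strip (pvRemBS line)
    let current := PySem.Chars.strip (st.2 ++ [' '] ++ continued)
    if PySem.Chars.endswith line ['\\'] then (st.1, current)
    else (st.1 ++ [String.ofList current], [])

def dockerfile_instructions_py (dockerfile_text : String) : List String :=
  ((PySem.Chars.splitlines dockerfile_text.toList).foldl pvStepA ([], [])).1

-- ===== PORT B =====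
-- Source B's `emit`: the enumerate + early-return scan finds the index of the first line
-- not ending in '\', slices that group off, joins its nonempty segments, recurses.
def pvEmit (ls : List (List Char)) : List String :=
  match h : ls.findIdx? (fun l => !PySem.Chars.endswith l ['\\']) with
  | none => []
  | some i =>
      String.ofList (PySem.Chars.join [' ']
        (((ls.take (i+1)).map (fun x => PySem.Chars.strip (pvRemBS x))).filter
          (fun p => !p.isEmpty)))
        :: pvEmit (ls.drop (i+1))
  termination_by ls.length
  decreasing_by
    have hne : ls ≠ [] := by rintro rfl; simp [List.findIdx?, List.findIdx?.go] at h
    have hpos : 0 < ls.length := List.length_pos_iff.mpr hne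
    simp [List.length_drop]; omega

def dockerfile_instructions_py_alt (dockerfile_text : String) : List String :=
  let lines := (PySem.Chars.splitlines dockerfile_text.toList).foldl
    (fun acc raw =>
      let line := PySem.Chars.strip raw
      if !line.isEmpty && !PySem.Chars.startswith line ['#'] then acc ++ [line] else acc) []
  pvEmit lines

-- ===== PRECONDITION & SPEC =====
def Spec_dockerfile_instructions_py (dockerfile_text : String) (out : List String) : Prop := out = dockerfile_instructions_py_alt dockerfile_text
instance (dockerfile_text : String) (out : List String) : Decidable (Spec_dockerfile_instructions_py dockerfile_text out) := by unfold Spec_dockerfile_instructions_py; infer_instance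

-- ===== CLAIM (what is proved, stated in full; the proofs are below) =====
def Claim_equal_dockerfile_instructions_py : Prop := ∀ (dockerfile_text : String), Dom_dockerfile_instructions_py dockerfile_text → Spec_dockerfile_instructions_py dockerfile_text (dockerfile_instructions_py dockerfile_text)

-- ===== LEMMAS AND PROOFS =====

def pvGood (cs : List Char) : Prop := PySem.Chars.strip cs = cs

lemma pvDW_head {p : Char → Bool} {a : Char} {t : List Char}
    (h : List.dropWhile p (a :: t) = a :: t) : p a = false := by
  by_contra hpa
  simp [eq_true_of_ne_false hpa] at h
  have := List.length_dropWhile_le p t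
  rw [h] at this; simp at this

lemma pvDW_app {p : Char → Bool} {x r : List Char}
    (hx : List.dropWhile p x = x) (h0 : x ≠ []) :
    List.dropWhile p (x ++ r) = x ++ r := by
  cases x with
  | nil => exact absurd rfl h0
  | cons a t => simp [pvDW_head hx]

lemma pvGood_iff {x : List Char} (h : pvGood x) :
    PySem.Chars.lstrip x = x ∧ PySem.Chars.rstrip x = x := by
  unfold pvGood PySem.Chars.strip at h
  have hls : PySem.Chars.lstrip x = x := by
    have h1 : (PySem.Chars.lstrip x).length ≤ x.length := by
      simpa [PySem.Chars.lstrip] using List.length_dropWhile_le PySem.Chars.isspace x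
    have h2 : x.length ≤ (PySem.Chars.lstrip x).length := by
      conv_lhs => rw [← h]
      simp [PySem.Chars.rstrip]
      have := List.length_dropWhile_le PySem.Chars.isspace (PySem.Chars.lstrip x).reverse
      simpa using this
    have hsuf : PySem.Chars.lstrip x <:+ x := List.dropWhile_suffix _
    exact hsuf.eq_of_length (le_antisymm h1 h2)
  rw [hls] at h
  exact ⟨hls, h⟩

lemma pvDW_idem {p : Char → Bool} (l : List Char) :
    List.dropWhile p (List.dropWhile p l) = List.dropWhile p l := by
  induction l with
  | nil => simp
  | cons a t ih => by_cases h : p a = true <;> simp [h, ih]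

lemma pvRstrip_prefix (y : List Char) : PySem.Chars.rstrip y <+: y := by
  have h := List.dropWhile_suffix (l := y.reverse) (p := PySem.Chars.isspace)
  unfold PySem.Chars.rstrip
  rw [← List.reverse_suffix]
  simpa using h

lemma pvGood_strip (z : List Char) : pvGood (PySem.Chars.strip z) := by
  unfold pvGood
  have hy : PySem.Chars.lstrip (PySem.Chars.lstrip z) = PySem.Chars.lstrip z := by
    simp [PySem.Chars.lstrip, pvDW_idem]
  set y := PySem.Chars.lstrip z with hydef
  have hls : PySem.Chars.lstrip (PySem.Chars.rstrip y) = PySem.Chars.rstrip y := by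
    cases hr : PySem.Chars.rstrip y with
    | nil => simp [PySem.Chars.lstrip]
    | cons a t =>
      obtain ⟨s, hs⟩ := hr ▸ pvRstrip_prefix y
      have hpa : PySem.Chars.isspace a = false := by
        refine pvDW_head (t := t ++ s) ?_
        rw [← hs] at hy
        simpa [PySem.Chars.lstrip, List.cons_append] using hy
      simp [PySem.Chars.lstrip, hpa]
  have hrr : PySem.Chars.rstrip (PySem.Chars.rstrip y) = PySem.Chars.rstrip y := by
    simp [PySem.Chars.rstrip, pvDW_idem]
  show PySem.Chars.rstrip (PySem.Chars.lstrip (PySem.Chars.rstrip (PySem.Chars.lstrip z))) = _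
  rw [← hydef, hls, hrr]
  simp [PySem.Chars.strip, ← hydef]

lemma pvRstrip_eq (x : List Char) (h : PySem.Chars.rstrip x = x) :
    List.dropWhile PySem.Chars.isspace x.reverse = x.reverse := by
  have := congrArg List.reverse h
  simpa [PySem.Chars.rstrip] using this

lemma pvStrip_snoc_space {cur : List Char} (h : pvGood cur) :
    PySem.Chars.strip (cur ++ [' ']) = cur := by
  obtain ⟨hl, hr⟩ := pvGood_iff h
  cases hc : cur with
  | nil => decide
  | cons a t =>
    subst hc
    unfold PySem.Chars.strip
    have h1 : PySem.Chars.lstrip (a :: t ++ [' ']) = a :: t ++ [' '] :=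
      pvDW_app (r := [' ']) hl (by simp)
    rw [h1]
    unfold PySem.Chars.rstrip
    rw [show (a :: t ++ [' ']).reverse = ' ' :: (a :: t).reverse by simp]
    rw [List.dropWhile_cons]
    simp only [show PySem.Chars.isspace ' ' = true from rfl, if_true]
    rw [pvRstrip_eq _ hr, List.reverse_reverse]

lemma pvStrip_space_cons {seg : List Char} (h : pvGood seg) :
    PySem.Chars.strip (' ' :: seg) = seg := by
  obtain ⟨hl, hr⟩ := pvGood_iff h
  unfold PySem.Chars.strip PySem.Chars.lstrip
  rw [List.dropWhile_cons]
  simp only [show PySem.Chars.isspace ' ' = true from rfl, if_true]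
  have : List.dropWhile PySem.Chars.isspace seg = seg := hl
  rw [this, hr]

lemma pvStrip_mid {cur seg : List Char} (hc : pvGood cur) (hs : pvGood seg)
    (hc0 : cur ≠ []) (hs0 : seg ≠ []) :
    PySem.Chars.strip (cur ++ ' ' :: seg) = cur ++ ' ' :: seg := by
  obtain ⟨hcl, hcr⟩ := pvGood_iff hc
  obtain ⟨hsl, hsr⟩ := pvGood_iff hs
  unfold PySem.Chars.strip
  rw [show PySem.Chars.lstrip (cur ++ ' ' :: seg) = cur ++ ' ' :: seg from
    pvDW_app hcl hc0]
  unfold PySem.Chars.rstrip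
  rw [show (cur ++ ' ' :: seg).reverse = seg.reverse ++ (' ' :: cur.reverse) by simp]
  rw [pvDW_app (pvRstrip_eq _ hsr) (by simpa using hs0)]
  simp

lemma pvInterc_cons (a : List Char) (l : List (List Char)) :
    List.intercalate [' '] (a :: l) =
      a ++ (if l.isEmpty then [] else ' ' :: List.intercalate [' '] l) := by
  cases l with
  | nil => simp [List.intercalate]
  | cons b l => simp [List.intercalate, List.intersperse]

lemma pvInterc_snoc (fs : List (List Char)) (x : List Char) :
    List.intercalate [' '] (fs ++ [x]) =
      if fs.isEmpty then x else List.intercalate [' '] fs ++ ' ' :: x := by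
  induction fs with
  | nil => simp [List.intercalate]
  | cons a fs ih =>
    rw [List.cons_append, pvInterc_cons, ih, pvInterc_cons a fs]
    cases fs <;> simp

def pvJoinNE (segs : List (List Char)) : List Char :=
  PySem.Chars.join [' '] (segs.filter (fun p => !p.isEmpty))

lemma pvInterc_ne_nil (fs : List (List Char)) (h : ∀ p ∈ fs, p ≠ [])
    (h0 : fs ≠ []) : List.intercalate [' '] fs ≠ [] := by
  cases fs with
  | nil => exact absurd rfl h0
  | cons a l =>
    rw [pvInterc_cons]
    have := h a (by simp)
    simp [this]

lemma pvCrux {cur seg : List Char} (segs : List (List Char)) (hc : pvGood cur)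
    (hs : pvGood seg) (hcur : cur = pvJoinNE segs) :
    PySem.Chars.strip (cur ++ [' '] ++ seg) = pvJoinNE (segs ++ [seg]) := by
  by_cases hseg : seg = []
  · subst hseg
    rw [List.append_nil, pvStrip_snoc_space hc, hcur]
    simp [pvJoinNE, List.filter_append]
  · have hfil : (segs ++ [seg]).filter (fun p => !p.isEmpty) =
        segs.filter (fun p => !p.isEmpty) ++ [seg] := by
      simp [List.filter_append, hseg]
    have hmem : ∀ p ∈ segs.filter (fun p => !p.isEmpty), p ≠ [] := by
      intro p hp
      have := List.of_mem_filter hp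
      simpa using this
    rw [show cur ++ [' '] ++ seg = cur ++ ' ' :: seg by simp]
    unfold pvJoinNE PySem.Chars.join
    rw [hfil, pvInterc_snoc]
    by_cases hfs : (segs.filter (fun p => !p.isEmpty)).isEmpty
    · have hcur0 : cur = [] := by
        rw [hcur]; unfold pvJoinNE PySem.Chars.join
        rw [List.isEmpty_iff.mp hfs]; simp [List.intercalate]
      rw [hcur0, hfs, if_pos rfl, List.nil_append]
      exact pvStrip_space_cons hs
    · have hcur0 : cur ≠ [] := by
        rw [hcur]; unfold pvJoinNE PySem.Chars.join
        exact pvInterc_ne_nil _ hmem (by simpa [List.isEmpty_iff] using hfs)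
      rw [if_neg (by simp [hfs]), pvStrip_mid hc hs hcur0 hseg, hcur]
      simp [pvJoinNE, PySem.Chars.join]

def pvStepA' (st : List String × List Char) (line : List Char) : List String × List Char :=
  let continued := PySem.Chars.strip (pvRemBS line)
  let current := PySem.Chars.strip (st.2 ++ [' '] ++ continued)
  if PySem.Chars.endswith line ['\\'] then (st.1, current)
  else (st.1 ++ [String.ofList current], [])

def pvFilter (ls : List (List Char)) (acc : List (List Char)) : List (List Char) :=
  ls.foldl (fun acc raw =>
    let line := PySem.Chars.strip raw
    if !line.isEmpty && !PySem.Chars.startswith line ['#'] then acc ++ [line] else acc) acc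

lemma pvFilter_acc (ls : List (List Char)) (acc : List (List Char)) :
    pvFilter ls acc = acc ++ pvFilter ls [] := by
  induction ls generalizing acc with
  | nil => simp [pvFilter]
  | cons raw ls ih =>
    simp only [pvFilter, List.foldl_cons]
    by_cases h : (!(PySem.Chars.strip raw).isEmpty &&
        !PySem.Chars.startswith (PySem.Chars.strip raw) ['#']) = true
    · rw [if_pos h, if_pos h]
      rw [show (ls.foldl _ (acc ++ [PySem.Chars.strip raw]) : List (List Char)) =
        pvFilter ls (acc ++ [PySem.Chars.strip raw]) from rfl]
      rw [show (ls.foldl _ ([] ++ [PySem.Chars.strip raw]) : List (List Char)) =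
        pvFilter ls ([] ++ [PySem.Chars.strip raw]) from rfl]
      rw [ih, ih ([] ++ [PySem.Chars.strip raw])]
      simp
    · rw [if_neg h, if_neg h]
      exact ih acc

lemma pvFoldA_filter (ls : List (List Char)) (st : List String × List Char) :
    ls.foldl pvStepA st = (pvFilter ls []).foldl pvStepA' st := by
  induction ls generalizing st with
  | nil => simp [pvFilter]
  | cons raw ls ih =>
    simp only [List.foldl_cons, pvFilter, pvStepA]
    by_cases h : (!(PySem.Chars.strip raw).isEmpty &&
        !PySem.Chars.startswith (PySem.Chars.strip raw) ['#']) = true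
    · have hcond : ((PySem.Chars.strip raw).isEmpty ||
          PySem.Chars.startswith (PySem.Chars.strip raw) ['#']) = false := by
        simp at h; simp [h]
      rw [if_pos h, hcond]
      rw [show (ls.foldl _ ([] ++ [PySem.Chars.strip raw]) : List (List Char)) =
        pvFilter ls ([] ++ [PySem.Chars.strip raw]) from rfl]
      rw [pvFilter_acc, List.nil_append, List.cons_append, List.nil_append,
        List.foldl_cons]
      rw [ih]
      rfl
    · have hcond : ((PySem.Chars.strip raw).isEmpty ||
          PySem.Chars.startswith (PySem.Chars.strip raw) ['#']) = true := by
        cases hx : (PySem.Chars.strip raw).isEmpty <;>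
          cases hy : PySem.Chars.startswith (PySem.Chars.strip raw) ['#'] <;>
          simp_all
      rw [if_neg h, hcond]
      simp only [if_true]
      exact ih st

lemma pvFilter_good (ls : List (List Char)) :
    ∀ y ∈ pvFilter ls [], pvGood y := by
  induction ls with
  | nil => simp [pvFilter]
  | cons raw ls ih =>
    intro y hy
    simp only [pvFilter, List.foldl_cons] at hy
    by_cases h : (!(PySem.Chars.strip raw).isEmpty &&
        !PySem.Chars.startswith (PySem.Chars.strip raw) ['#']) = true
    · rw [if_pos h] at hy
      rw [show (ls.foldl _ ([] ++ [PySem.Chars.strip raw]) : List (List Char)) =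
        pvFilter ls ([] ++ [PySem.Chars.strip raw]) from rfl, pvFilter_acc] at hy
      simp at hy
      rcases hy with h1 | h1
      · rw [h1]; exact pvGood_strip raw
      · exact ih y h1
    · rw [if_neg h] at hy
      exact ih y hy

-- recursive grouping with an explicit pending-segments parameter (proof helper)
def pvEmitPend (segs : List (List Char)) : List (List Char) → List String
  | [] => []
  | y :: ys =>
      let s := PySem.Chars.strip (pvRemBS y)
      if PySem.Chars.endswith y ['\\'] then pvEmitPend (segs ++ [s]) ys
      else String.ofList (pvJoinNE (segs ++ [s])) :: pvEmitPend [] ys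

lemma pvMain2 (ys : List (List Char)) :
    ∀ ins cur segs, (∀ y ∈ ys, pvGood y) → pvGood cur → cur = pvJoinNE segs →
      (ys.foldl pvStepA' (ins, cur)).1 = ins ++ pvEmitPend segs ys := by
  induction ys with
  | nil => intro ins cur segs _ _ _; simp [pvEmitPend]
  | cons y ys ih =>
    intro ins cur segs hys hg hcur
    have hseg : pvGood (PySem.Chars.strip (pvRemBS y)) := pvGood_strip _
    have hkey := pvCrux segs hg hseg hcur
    simp only [List.foldl_cons, pvStepA', pvEmitPend]
    by_cases hb : PySem.Chars.endswith y ['\\'] = true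
    · rw [if_pos hb, if_pos hb]
      exact ih ins _ _ (fun z hz => hys z (by simp [hz])) (pvGood_strip _) hkey
    · rw [if_neg hb, if_neg hb]
      rw [show PySem.Chars.strip (cur ++ [' '] ++ PySem.Chars.strip (pvRemBS y)) =
        pvJoinNE (segs ++ [PySem.Chars.strip (pvRemBS y)]) from hkey]
      rw [ih _ _ [] (fun z hz => hys z (by simp [hz])) (by unfold pvGood; rfl)
        (by simp [pvJoinNE, PySem.Chars.join, List.intercalate])]
      simp

lemma pvFind_append {p : List Char → Bool} (pend rest : List (List Char))
    (h : ∀ x ∈ pend, p x = false) :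
    (pend ++ rest).findIdx? p = (rest.findIdx? p).map (· + pend.length) := by
  induction pend with
  | nil => simp
  | cons a t ih =>
    have ha := h a (by simp)
    rw [List.cons_append, List.findIdx?_cons]
    simp only [ha, Bool.false_eq_true, if_false,
      ih (fun x hx => h x (by simp [hx])), Option.map_map]
    cases rest.findIdx? p with
    | none => rfl
    | some i => simp

lemma pvEmit_bridge (ls : List (List Char)) : ∀ pend : List (List Char),
    (∀ x ∈ pend, PySem.Chars.endswith x ['\\'] = true) →
    pvEmit (pend ++ ls) =
      pvEmitPend (pend.map (fun x => PySem.Chars.strip (pvRemBS x))) ls := by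
  induction ls with
  | nil =>
    intro pend hp
    have hfind : (pend ++ ([] : List (List Char))).findIdx?
        (fun l => !PySem.Chars.endswith l ['\\']) = none := by
      rw [pvFind_append _ _ (fun x hx => by simp [hp x hx])]; rfl
    rw [pvEmit]
    split
    · simp [pvEmitPend]
    · rename_i i heq; rw [hfind] at heq; exact absurd heq (by simp)
  | cons y ys ih =>
    intro pend hp
    by_cases hb : PySem.Chars.endswith y ['\\'] = true
    · have h1 : pend ++ y :: ys = (pend ++ [y]) ++ ys := by simp
      rw [h1, ih (pend ++ [y]) (by intro x hx; rcases List.mem_append.mp hx with h | h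
                                   · exact hp x h
                                   · simp at h; rw [h]; exact hb)]
      simp [pvEmitPend, hb]
    · have hfind : (pend ++ y :: ys).findIdx?
          (fun l => !PySem.Chars.endswith l ['\\']) = some pend.length := by
        rw [pvFind_append _ _ (fun x hx => by simp [hp x hx])]
        rw [List.findIdx?_cons]
        simp [hb]
      rw [pvEmit]
      split
      · rename_i heq; rw [hfind] at heq; exact absurd heq (by simp)
      · rename_i i heq
        rw [hfind] at heq
        injection heq with hi
        subst hi
        have htake : (pend ++ y :: ys).take (pend.length + 1) = pend ++ [y] := by
          rw [show pend ++ y :: ys = (pend ++ [y]) ++ ys by simp,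
            show pend.length + 1 = (pend ++ [y]).length by simp]
          exact List.take_left
        have hdrop : (pend ++ y :: ys).drop (pend.length + 1) = ys := by
          rw [show pend ++ y :: ys = (pend ++ [y]) ++ ys by simp,
            show pend.length + 1 = (pend ++ [y]).length by simp]
          exact List.drop_left
        rw [htake, hdrop]
        have hys : pvEmit ys = pvEmitPend [] ys := by simpa using ih [] (by simp)
        rw [hys]
        simp [pvEmitPend, hb, pvJoinNE, PySem.Chars.join, List.map_append]

-- ===== VERDICT (by name: the statement is the Claim_ definition above) =====
theorem dockerfile_instructions_py_spec : Claim_equal_dockerfile_instructions_py := by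
  intro s _
  unfold Spec_dockerfile_instructions_py dockerfile_instructions_py dockerfile_instructions_py_alt
  rw [pvFoldA_filter]
  rw [pvMain2 _ [] [] [] (pvFilter_good _) (by unfold pvGood; rfl)
    (by simp [pvJoinNE, PySem.Chars.join, List.intercalate])]
  have hb2 : pvEmitPend [] (pvFilter (PySem.Chars.splitlines s.toList) []) =
      pvEmit (pvFilter (PySem.Chars.splitlines s.toList) []) := by
    simpa using (pvEmit_bridge (pvFilter (PySem.Chars.splitlines s.toList) []) [] (by simp)).symm
  rw [hb2]
  simp only [List.nil_append]
  rfl
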